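-- pv_equiv track=rewrite | github.com/pypi-data/pypi-mirror-21 | packages/spec_cleaner/spec_cleaner-0.9.4.tar.gz/spec_cleaner-0.9.4/spec_cleaner/rpmpreamble.py | _verify_prereq_message
-- ===== SOURCE A (Python) =====
-- def _verify_prereq_message(elements):
--     """
--         Verify if the prereq is present in the Requires(*) and add the fixme
--         comment if needed
--     """
--     message = '# FIXME: use proper Requires(pre/post/preun/...)'
--
--     # Check first if we have prereq values included
--     if not any("PreReq" in s for s in elements):
--         return elements
--
--     # Verify the message is not already present
--     if any(message in s for s in elements):
--         return elements
--
--     # add the message on the first position after any whitespace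
--     location = next(i for i, j in enumerate(elements) if j)
--     elements.insert(location, message)
--
--     return elements
-- ===== SOURCE B (Python) =====
-- def _verify_prereq_message(elements):
--     """
--         Verify if the prereq is present in the Requires(*) and add the fixme
--         comment if needed
--     """
--     message = '# FIXME: use proper Requires(pre/post/preun/...)'
--     fixed = _fix(elements, message)
--     if fixed is None:
--         return elements
--     elements[:] = fixed
--     return elements
--
--
-- def _fix(rest, message):
--     """Recursive descent: skip leading blank entries, then decide at the
--     first non-blank one.  Returns the rebuilt list, or None if no change
--     is needed (blank entries cannot contain PreReq or the message, so
--     checking the suffix from the first non-blank entry on is enough)."""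
--     if not rest:
--         return None
--     head = rest[0]
--     if not head:
--         tail = _fix(rest[1:], message)
--         return None if tail is None else [head] + tail
--     if any(message in s for s in rest):
--         return None
--     if not any("PreReq" in s for s in rest):
--         return None
--     return [message] + rest
-- ===== Notes on version B (the rewrite author's own statement) =====
-- stated objective: alternative
-- what changed: Replaces A's three flat scans plus in-place insert with a recursive descent that skips the leading blank entries, decides both conditions only on the suffix from the first non-blank entry (blanks cannot contain either needle), rebuilds the list functionally and writes it back with a slice assignment.
import Mathlib
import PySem

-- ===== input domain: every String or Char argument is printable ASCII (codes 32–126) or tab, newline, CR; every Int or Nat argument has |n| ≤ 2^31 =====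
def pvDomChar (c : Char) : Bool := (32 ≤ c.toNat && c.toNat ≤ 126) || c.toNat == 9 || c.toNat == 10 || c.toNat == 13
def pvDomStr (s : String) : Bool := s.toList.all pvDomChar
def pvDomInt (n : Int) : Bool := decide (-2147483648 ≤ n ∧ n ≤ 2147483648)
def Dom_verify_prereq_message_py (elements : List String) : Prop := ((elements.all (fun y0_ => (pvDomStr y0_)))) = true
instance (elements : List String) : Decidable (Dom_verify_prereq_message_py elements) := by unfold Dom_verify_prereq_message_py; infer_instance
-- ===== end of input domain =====

-- B replaces A's three flat scans + insert with a recursive descent that skips leading blanks,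
-- decides on the suffix and rebuilds the list (objective: alternative).  Both A and B mutate
-- `elements` in place to the same final contents; the theorems are about the return value.

-- ===== PORT A =====
def pvMessage : String := "# FIXME: use proper Requires(pre/post/preun/...)"

-- port of `next(i for i, j in enumerate(elements) if j)` (none = StopIteration; unreachable when PreReq present)
def pvFirstTruthy : List String → Nat → Option Nat
  | [], _ => none
  | j :: rest, i => if j ≠ "" then some i else pvFirstTruthy rest (i + 1)

def verify_prereq_message_py (elements : List String) : List String :=
  if ¬ elements.any (fun s => PySem.Str.isIn "PreReq" s) then elements
  else if elements.any (fun s => PySem.Str.isIn pvMessage s) then elements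
  else match pvFirstTruthy elements 0 with
    | none => elements
    | some location => PySem.List.insert elements (location : Int) pvMessage

-- ===== PORT B =====
-- port of Source B's `_fix`: recursive descent, none = "no change needed"
def pvFix : List String → Option (List String)
  | [] => none
  | head :: rest' =>
    if head = "" then (pvFix rest').map (fun tail => head :: tail)
    else if (head :: rest').any (fun s => PySem.Str.isIn pvMessage s) then none
    else if ¬ (head :: rest').any (fun s => PySem.Str.isIn "PreReq" s) then none
    else some (pvMessage :: head :: rest')

def verify_prereq_message_py_alt (elements : List String) : List String :=
  match pvFix elements with
  | none => elements
  | some fixed => fixed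

-- ===== PRECONDITION & SPEC =====
def Spec_verify_prereq_message_py (elements : List String) (out : List String) : Prop := out = verify_prereq_message_py_alt elements
instance (elements : List String) (out : List String) : Decidable (Spec_verify_prereq_message_py elements out) := by unfold Spec_verify_prereq_message_py; infer_instance

-- ===== CLAIM (what is proved, stated in full; the proofs are below) =====
def Claim_equal_verify_prereq_message_py : Prop := ∀ (elements : List String), Dom_verify_prereq_message_py elements → Spec_verify_prereq_message_py elements (verify_prereq_message_py elements)

-- ===== LEMMAS AND PROOFS =====
theorem pvFirstTruthy_shift (xs : List String) (i : Nat) :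
    pvFirstTruthy xs i = (pvFirstTruthy xs 0).map (· + i) := by
  induction xs generalizing i with
  | nil => rfl
  | cons j rest ih =>
    by_cases h : j = ""
    · simp only [pvFirstTruthy, h]
      rw [ih (i + 1), ih 1]
      cases pvFirstTruthy rest 0
      · simp
      · simp; omega
    · simp [pvFirstTruthy, h]

theorem pvFirstTruthy_lt (xs : List String) (i : Nat)
    (h : pvFirstTruthy xs 0 = some i) : i < xs.length := by
  induction xs generalizing i with
  | nil => simp [pvFirstTruthy] at h
  | cons j rest ih =>
    by_cases hj : j = ""
    · rw [pvFirstTruthy, if_neg (by simp [hj]), pvFirstTruthy_shift] at h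
      cases hr : pvFirstTruthy rest 0 with
      | none => rw [hr] at h; simp at h
      | some k =>
        rw [hr] at h
        simp only [Option.map_some, Option.some.injEq] at h
        have := ih k hr
        simp only [List.length_cons]
        omega
    · rw [pvFirstTruthy, if_pos (by simp [hj])] at h
      simp only [Option.some.injEq] at h
      simp only [List.length_cons]
      omega

theorem pvFix_unfold_blank (rest : List String) :
    pvFix ("" :: rest) = (pvFix rest).map (fun tail => "" :: tail) := by
  rw [pvFix]; simp

theorem pvFix_spec (xs : List String) :
    pvFix xs =
      if xs.any (fun s => PySem.Str.isIn pvMessage s) then none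
      else if ¬ xs.any (fun s => PySem.Str.isIn "PreReq" s) then none
      else (pvFirstTruthy xs 0).map
        (fun (i : Nat) => PySem.List.insert xs (i : Int) pvMessage) := by
  induction xs with
  | nil => simp [pvFix]
  | cons head rest ih =>
    by_cases h : head = ""
    · subst h
      have hm : PySem.Str.isIn pvMessage "" = false := by decide
      have hp : PySem.Str.isIn "PreReq" "" = false := by decide
      rw [pvFix_unfold_blank, ih]
      simp only [List.any_cons, hm, hp, Bool.false_or]
      have hft : pvFirstTruthy ("" :: rest) 0 = (pvFirstTruthy rest 0).map (· + 1) := by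
        rw [pvFirstTruthy, if_neg (by simp), pvFirstTruthy_shift]
      split_ifs with h1 h2 <;> try rfl
      rw [hft]
      cases hr : pvFirstTruthy rest 0 with
      | none => rfl
      | some i =>
        have hlt := pvFirstTruthy_lt rest i hr
        simp only [Option.map_some]
        congr 1
        rw [PySem.List.insert_natCast rest i pvMessage (by omega),
            PySem.List.insert_natCast ("" :: rest) (i + 1) pvMessage
              (by simp only [List.length_cons]; omega)]
        rfl
    · rw [pvFix, if_neg h]
      have hft : pvFirstTruthy (head :: rest) 0 = some 0 := by
        rw [pvFirstTruthy, if_pos (by simp [h])]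
      split_ifs with h1 h2 <;> try rfl
      rw [hft]
      simp only [Option.map_some, Nat.cast_zero, PySem.List.insert_zero]

-- ===== VERDICT (by name: the statement is the Claim_ definition above) =====
theorem verify_prereq_message_py_spec : Claim_equal_verify_prereq_message_py := by
  intro elements _
  unfold Spec_verify_prereq_message_py verify_prereq_message_py verify_prereq_message_py_alt
  rw [pvFix_spec]
  by_cases hm : elements.any (fun s => PySem.Str.isIn pvMessage s)
  · conv_rhs => rw [if_pos hm]
    by_cases hp : elements.any (fun s => PySem.Str.isIn "PreReq" s)
    · rw [if_neg (not_not_intro hp), if_pos hm]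
    · rw [if_pos hp]
  · conv_rhs => rw [if_neg hm]
    by_cases hp : elements.any (fun s => PySem.Str.isIn "PreReq" s)
    · conv_rhs => rw [if_neg (not_not_intro hp)]
      rw [if_neg (not_not_intro hp), if_neg hm]
      cases pvFirstTruthy elements 0 <;> rfl
    · conv_rhs => rw [if_pos hp]
      rw [if_pos hp]
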